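-- pv_equiv track=rewrite | github.com/sagieinav/obsidian-cs-knowledge-base | 20 Education/23 Semester 1/23.01 Computer Science Intro/3 Tasks/3.8 Lists.py | mirrored_couple
-- ===== SOURCE A (Python) =====
-- def mirrored_couple(num1, num2):
--     num_reversed = 0
--     target = num2
--     while num1 > 0:
--         if num2 == 0:
--             return False
--         current_dig = num1 % 10
--         num_reversed *= 10
--         num_reversed += current_dig
--
--         num1 //= 10
--         num2 //= 10
--
--     if num2 != 0:
--         return False
--     elif num_reversed == target:
--         return True
--     else:
--         return False
-- ===== SOURCE B (Python) =====
-- def mirrored_couple(num1, num2):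
--     return str(num1)[::-1] == str(num2)
-- ===== Notes on version B (the rewrite author's own statement) =====
-- stated objective: idiomatic
-- what changed: Replaced the digit-by-digit modulo/floordiv reversal loop (with its in-loop length tracking of num2) by a single comparison of num1's decimal string reversed against num2's decimal string.
-- intended difference: For negative num1 with num2 == 0 A skips its loop and returns True from leftover state (num_reversed == target == 0), while B returns False because a negative number reversed ('5-') is no decimal numeral; B's False is the intended answer since a negative number is not a mirror of 0. — e.g. on mirrored_couple(-1, 0): A returns true, B returns false
import Mathlib
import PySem

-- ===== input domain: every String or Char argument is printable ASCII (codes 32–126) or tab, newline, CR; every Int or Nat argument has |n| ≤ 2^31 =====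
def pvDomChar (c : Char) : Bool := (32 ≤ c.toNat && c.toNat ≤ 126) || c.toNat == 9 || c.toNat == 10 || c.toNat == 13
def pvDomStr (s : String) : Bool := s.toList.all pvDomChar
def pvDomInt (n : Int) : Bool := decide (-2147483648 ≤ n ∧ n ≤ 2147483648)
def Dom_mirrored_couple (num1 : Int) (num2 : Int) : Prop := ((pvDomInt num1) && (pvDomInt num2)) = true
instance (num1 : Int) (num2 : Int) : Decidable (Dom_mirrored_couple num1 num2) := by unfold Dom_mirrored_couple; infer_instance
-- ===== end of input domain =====

-- B replaces A's modulo/floordiv digit-reversal loop by one reversed-decimal-string comparison;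
-- on num1 < 0 with num2 == 0 A's leftover-state True is replaced by B's intended False (see D_ below).

-- termination helper for the port of A's while-loop
theorem pvFloordiv10_toNat_lt (n : Int) (h : 0 < n) :
    (PySem.Int.floordiv n 10).toNat < n.toNat := by
  show (Int.fdiv n 10).toNat < n.toNat
  rw [Int.fdiv_eq_ediv]
  simp only [Nat.ofNat_nonneg, true_or, if_pos]
  omega

-- ===== PORT A =====
-- A's while-loop: state (num1, num2, num_reversed, target); the code after the loop is the
-- `else` branch (reached exactly when `num1 > 0` fails)
def mirrored_couple_loop (num1 num2 num_reversed target : Int) : Bool :=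
  if 0 < num1 then
    if num2 = 0 then false
    else
      mirrored_couple_loop (PySem.Int.floordiv num1 10) (PySem.Int.floordiv num2 10)
        (num_reversed * 10 + PySem.Int.mod num1 10) target
  else
    if num2 ≠ 0 then false
    else if num_reversed = target then true
    else false
termination_by num1.toNat
decreasing_by exact pvFloordiv10_toNat_lt num1 (by omega)

def mirrored_couple (num1 : Int) (num2 : Int) : Bool :=
  mirrored_couple_loop num1 num2 0 num2

-- ===== PORT B =====
-- str(num1)[::-1] == str(num2); s[::-1] is string reversal (PySem.Str.slice?_none_none_neg_one)
def mirrored_couple_alt (num1 : Int) (num2 : Int) : Bool :=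
  String.ofList (PySem.Int.toStr num1).toList.reverse == PySem.Int.toStr num2

-- ===== PRECONDITION & SPEC =====
-- On num1 < 0 with num2 == 0, A skips its loop and returns True from leftover state
-- (num_reversed == target == 0); B returns False, the intended answer, since a negative
-- number is not a mirror of 0.
def D_mirrored_couple (num1 : Int) (num2 : Int) : Prop := num1 < 0 ∧ num2 = 0
instance (num1 : Int) (num2 : Int) : Decidable (D_mirrored_couple num1 num2) := by
  unfold D_mirrored_couple; infer_instance

def Spec_mirrored_couple (num1 : Int) (num2 : Int) (out : Bool) : Prop :=
  ¬ D_mirrored_couple num1 num2 → out = mirrored_couple_alt num1 num2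
instance (num1 : Int) (num2 : Int) (out : Bool) : Decidable (Spec_mirrored_couple num1 num2 out) := by
  unfold Spec_mirrored_couple; infer_instance

def pvDiffWitness_mirrored_couple : Int × Int := (-1, 0)
def pvDiffWitnessOut_mirrored_couple : Bool × Bool := (true, false)

-- ===== CLAIM (what is proved, stated in full; the proofs are below) =====
def Claim_unchanged_mirrored_couple : Prop := ∀ (num1 : Int) (num2 : Int), Dom_mirrored_couple num1 num2 → Spec_mirrored_couple num1 num2 (mirrored_couple num1 num2)
def Claim_changed_mirrored_couple : Prop := Dom_mirrored_couple (pvDiffWitness_mirrored_couple.1) (pvDiffWitness_mirrored_couple.2) ∧ D_mirrored_couple (pvDiffWitness_mirrored_couple.1) (pvDiffWitness_mirrored_couple.2) ∧ mirrored_couple (pvDiffWitness_mirrored_couple.1) (pvDiffWitness_mirrored_couple.2) = pvDiffWitnessOut_mirrored_couple.1 ∧ mirrored_couple_alt (pvDiffWitness_mirrored_couple.1) (pvDiffWitness_mirrored_couple.2) = pvDiffWitnessOut_mirrored_couple.2 ∧ pvDiffWitnessOut_mirrored_couple.1 ≠ pvDiffWitnessOut_mirrored_couple.2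
def Claim_exact_mirrored_couple : Prop := ∀ (num1 : Int) (num2 : Int), Dom_mirrored_couple num1 num2 → D_mirrored_couple num1 num2 → mirrored_couple num1 num2 ≠ mirrored_couple_alt num1 num2

-- ===== LEMMAS AND PROOFS =====

theorem pvFloordiv_eq (a : Int) : PySem.Int.floordiv a 10 = a / 10 := by
  show Int.fdiv a 10 = a / 10
  rw [Int.fdiv_eq_ediv]; simp

theorem pvMod_eq (a : Int) : PySem.Int.mod a 10 = a % 10 := by
  show Int.fmod a 10 = a % 10
  rw [Int.fmod_eq_emod]; simp

-- the character list of the decimal numeral of a natural number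
def pvNumeral (n : ℕ) : List Char :=
  if n = 0 then ['0'] else ((Nat.digits 10 n).map Nat.digitChar).reverse

theorem pvToDigitsCore_eq : ∀ (f n : ℕ), n < f → ∀ (ds : List Char),
    Nat.toDigitsCore 10 f n ds = pvNumeral n ++ ds := by
  intro f
  induction f with
  | zero => omega
  | succ f ih =>
    intro n hn ds
    rw [Nat.toDigitsCore]
    by_cases h0 : n / 10 = 0
    · simp only [h0, if_pos]
      by_cases hz : n = 0
      · subst hz; simp [pvNumeral]; decide
      · have h10 : n < 10 := by omega
        rw [pvNumeral, if_neg hz, Nat.digits_def' (by norm_num : (1:ℕ) < 10) (by omega), h0]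
        simp [Nat.mod_eq_of_lt h10]
    · rw [if_neg h0, ih (n / 10) (by omega) _]
      have hz : n ≠ 0 := by omega
      have key : pvNumeral n = pvNumeral (n / 10) ++ [(n % 10).digitChar] := by
        rw [pvNumeral, if_neg hz, Nat.digits_def' (by norm_num : (1:ℕ) < 10) (by omega),
          List.map_cons, List.reverse_cons, pvNumeral, if_neg h0]
      rw [key]
      simp

theorem pvToDigits_eq (n : ℕ) : Nat.toDigits 10 n = pvNumeral n := by
  rw [Nat.toDigits, pvToDigitsCore_eq (n + 1) n (by omega), List.append_nil]

theorem pvToChars_eq (n : Int) :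
    PySem.Int.toChars n = if n < 0 then '-' :: pvNumeral n.natAbs else pvNumeral n.toNat := by
  rw [PySem.Int.toChars]
  split_ifs with h
  · rw [pvToDigits_eq]
  · rw [pvToDigits_eq]

theorem pvDash_not_mem (n : ℕ) : '-' ∉ pvNumeral n := by
  rw [pvNumeral]
  split_ifs with h
  · decide
  · intro hm
    simp only [List.mem_reverse, List.mem_map] at hm
    obtain ⟨d, hd, hdc⟩ := hm
    have : d < 10 := Nat.digits_lt_base (by norm_num) hd
    interval_cases d <;> exact absurd hdc (by decide)

theorem pvNumeral_ne_nil (n : ℕ) : pvNumeral n ≠ [] := by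
  rw [pvNumeral]
  split_ifs with h
  · simp
  · simp [Nat.digits_ne_nil_iff_ne_zero, h]

theorem pvDigitChar_inj {a b : ℕ} (ha : a < 10) (hb : b < 10)
    (h : Nat.digitChar a = Nat.digitChar b) : a = b := by
  interval_cases a <;> interval_cases b <;> first | rfl | exact absurd h (by decide)

theorem pvMapEq (l1 l2 : List ℕ) (h1 : ∀ x ∈ l1, x < 10) (h2 : ∀ x ∈ l2, x < 10) :
    l1.map Nat.digitChar = l2.map Nat.digitChar ↔ l1 = l2 := by
  constructor
  · intro h
    induction l1 generalizing l2 with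
    | nil => cases l2 with
      | nil => rfl
      | cons y ys => simp at h
    | cons x xs ih =>
      cases l2 with
      | nil => simp at h
      | cons y ys =>
        simp only [List.map_cons, List.cons.injEq] at h
        have hx := pvDigitChar_inj (h1 x (by simp)) (h2 y (by simp)) h.1
        have := ih ys (fun z hz => h1 z (List.mem_cons_of_mem _ hz))
          (fun z hz => h2 z (List.mem_cons_of_mem _ hz)) h.2
        rw [hx, this]
  · intro h; rw [h]

theorem pvNumeral_singleton (n : ℕ) : pvNumeral n = ['0'] ↔ n = 0 := by
  constructor
  · intro h
    by_contra hn
    rw [pvNumeral, if_neg hn] at h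
    have h' : (Nat.digits 10 n).map Nat.digitChar = ['0'] := by
      have := congrArg List.reverse h
      simpa using this
    have : (Nat.digits 10 n).map Nat.digitChar = [0].map Nat.digitChar := by simpa using h'
    rw [pvMapEq _ _ (fun x hx => Nat.digits_lt_base (by norm_num) hx) (by simp)] at this
    have hh := Nat.ofDigits_digits 10 n
    rw [this] at hh
    exact hn (by simpa [Nat.ofDigits] using hh.symm)
  · intro h; rw [h, pvNumeral]; simp

theorem pvLoop_neg (m : ℕ) : ∀ (n1 n2 rev t : Int), n1.toNat = m → n2 < 0 →
    mirrored_couple_loop n1 n2 rev t = false := by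
  induction m using Nat.strong_induction_on with
  | _ m ih =>
    intro n1 n2 rev t hm h2
    rw [mirrored_couple_loop]
    split_ifs with h1 hz
    all_goals first
      | rfl
      | omega
      | exact ih (PySem.Int.floordiv n1 10).toNat
          (by rw [pvFloordiv_eq]; omega) _ _ _ _ rfl (by rw [pvFloordiv_eq]; omega)

theorem pvLoop_char (m : ℕ) : ∀ (a b : ℕ) (rev t : Int), a = m → 0 < a →
    mirrored_couple_loop (a : Int) (b : Int) rev t =
      decide (10 ^ ((Nat.digits 10 a).length - 1) ≤ b ∧
              b < 10 ^ (Nat.digits 10 a).length ∧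
              rev * 10 ^ (Nat.digits 10 a).length
                + ((Nat.ofDigits 10 (Nat.digits 10 a).reverse : ℕ) : Int) = t) := by
  induction m using Nat.strong_induction_on with
  | _ m ih =>
    intro a b rev t hm ha
    have hdig : Nat.digits 10 a = a % 10 :: Nat.digits 10 (a / 10) :=
      Nat.digits_def' (by norm_num) ha
    rw [mirrored_couple_loop]
    split_ifs with h1 hz
    · -- b = 0 : RHS is false since 10^(k-1) ≥ 1 > 0
      have hb : b = 0 := by omega
      have hpow : 0 < 10 ^ ((Nat.digits 10 a).length - 1) := pow_pos (by norm_num : (0:ℕ) < 10) _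
      subst hb
      rw [eq_comm, decide_eq_false_iff_not]
      rintro ⟨hle, -, -⟩
      omega
    · -- recursive step
      have hb0 : 0 < b := by omega
      rw [pvFloordiv_eq, pvFloordiv_eq, pvMod_eq]
      have e1 : (a : Int) / 10 = ((a / 10 : ℕ) : Int) := by omega
      have e2 : (b : Int) / 10 = ((b / 10 : ℕ) : Int) := by omega
      have e3 : (a : Int) % 10 = ((a % 10 : ℕ) : Int) := by omega
      rw [e1, e2, e3]
      by_cases hq : a / 10 = 0
      · -- last digit of a: the recursive call takes the exit branch
        have h10 : a < 10 := by omega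
        have hdig2 : Nat.digits 10 a = [a % 10] := by rw [hdig, hq]; simp
        rw [hq, mirrored_couple_loop]
        simp only [Nat.cast_zero, lt_irrefl, if_false, hdig2, List.length_cons,
          List.length_nil, List.reverse_cons, List.reverse_nil, List.nil_append,
          Nat.mod_eq_of_lt h10]
        have hofd : ((Nat.ofDigits 10 [a] : ℕ) : ℤ) = (a : ℤ) := by simp [Nat.ofDigits]
        rw [hofd]
        by_cases hb10 : b / 10 = 0
        · have hb' : b < 10 := by omega
          have hcast : ((b / 10 : ℕ) : Int) = 0 := by omega
          rw [hcast]
          simp only [ne_eq, not_true_eq_false, if_false]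
          have c1 : 1 ≤ b := hb0
          have c2 : b < 10 := hb'
          by_cases ht : rev * 10 + (a : Int) = t
          · simp [ht, c1, c2]
          · simp [ht, c1, c2]
        · have hcast : ((b / 10 : ℕ) : Int) ≠ 0 := by omega
          simp only [ne_eq, hcast, not_false_eq_true, if_true]
          have : ¬ b < 10 := by omega
          simp [this]
      · -- a has more digits: apply the induction hypothesis
        have ha' : 0 < a / 10 := Nat.pos_of_ne_zero hq
        rw [ih (a / 10) (by omega) (a / 10) (b / 10) _ _ rfl ha']
        rw [decide_eq_decide]
        set k := (Nat.digits 10 (a / 10)).length with hk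
        have hne : Nat.digits 10 (a / 10) ≠ [] := Nat.digits_ne_nil_iff_ne_zero.mpr hq
        have hk1 : 1 ≤ k := by
          rw [hk]
          cases h : Nat.digits 10 (a / 10) with
          | nil => exact absurd h hne
          | cons x xs => simp
        have hlen : (Nat.digits 10 a).length = k + 1 := by rw [hdig]; simp [hk]
        have hrev : (Nat.digits 10 a).reverse = (Nat.digits 10 (a / 10)).reverse ++ [a % 10] := by
          rw [hdig]; simp
        have hofd : ((Nat.ofDigits 10 (Nat.digits 10 a).reverse : ℕ) : ℤ)
            = ((Nat.ofDigits 10 (Nat.digits 10 (a / 10)).reverse : ℕ) : ℤ)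
              + 10 ^ k * ((a % 10 : ℕ) : ℤ) := by
          rw [hrev, Nat.ofDigits_append, Nat.ofDigits_singleton, List.length_reverse, ← hk]
          push_cast
          ring
        have f1 : 10 ^ (k - 1) ≤ b / 10 ↔ 10 ^ k ≤ b := by
          rw [Nat.le_div_iff_mul_le (by norm_num)]
          constructor <;> intro h
          · calc 10 ^ k = 10 ^ (k - 1) * 10 := by
                  rw [← pow_succ]; congr 1; omega
              _ ≤ b := h
          · calc 10 ^ (k - 1) * 10 = 10 ^ k := by
                  rw [← pow_succ]; congr 1; omega
              _ ≤ b := h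
        have f2 : b / 10 < 10 ^ k ↔ b < 10 ^ (k + 1) := by
          rw [Nat.div_lt_iff_lt_mul (by norm_num), ← pow_succ]
        rw [hlen, hofd]
        simp only [Nat.add_sub_cancel, f1, f2]
        constructor
        · rintro ⟨x1, x2, x3⟩
          refine ⟨x1, x2, ?_⟩
          rw [← x3]; push_cast; ring
        · rintro ⟨x1, x2, x3⟩
          refine ⟨x1, x2, ?_⟩
          rw [← x3]; push_cast; ring
    all_goals omega

-- B as a proposition on character lists
theorem pvAlt_eq (n1 n2 : Int) :
    mirrored_couple_alt n1 n2
      = decide ((PySem.Int.toChars n1).reverse = PySem.Int.toChars n2) := by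
  show (String.ofList (PySem.Int.toStr n1).toList.reverse == PySem.Int.toStr n2) = _
  rw [Bool.eq_iff_iff, beq_iff_eq, decide_eq_true_iff]
  rw [PySem.Int.toList_toStr]
  constructor
  · intro h
    have := congrArg String.toList h
    simpa [PySem.Int.toList_toStr] using this
  · intro h
    rw [h, ← PySem.Int.toList_toStr]
    exact String.ofList_toList

-- the arithmetic form of A's answer coincides with reversed-digit-list equality
theorem pvKey (a b : ℕ) (ha : 0 < a) (hb : 0 < b) :
    (10 ^ ((Nat.digits 10 a).length - 1) ≤ b ∧ b < 10 ^ (Nat.digits 10 a).length ∧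
      (Nat.ofDigits 10 (Nat.digits 10 a).reverse : ℕ) = b)
    ↔ Nat.digits 10 a = (Nat.digits 10 b).reverse := by
  set k := (Nat.digits 10 a).length with hk
  set l := (Nat.digits 10 a).reverse with hl
  have hnil : l ≠ [] := by
    rw [hl]
    simp [Nat.digits_ne_nil_iff_ne_zero, ha.ne']
  have hmem : ∀ x ∈ l, x < 10 := fun x hx =>
    Nat.digits_lt_base (by norm_num) (List.mem_reverse.mp hx)
  have hllen : l.length = k := by rw [hl, hk, List.length_reverse]
  constructor
  · rintro ⟨hlo, _, hval⟩
    have hlast : l.getLast hnil ≠ 0 := by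
      intro h0
      have hsplit : l = l.dropLast ++ [l.getLast hnil] := (List.dropLast_append_getLast hnil).symm
      have : (Nat.ofDigits 10 l : ℕ) = Nat.ofDigits 10 l.dropLast := by
        conv_lhs => rw [hsplit]
        rw [Nat.ofDigits_append, h0]
        simp [Nat.ofDigits]
      have hlt : (Nat.ofDigits 10 l.dropLast : ℕ) < 10 ^ (k - 1) := by
        have := Nat.ofDigits_lt_base_pow_length (b := 10) (l := l.dropLast) (by norm_num)
          (fun x hx => hmem x (List.mem_of_mem_dropLast hx))
        rwa [List.length_dropLast, hllen] at this
      omega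
    have : Nat.digits 10 b = l := by
      rw [← hval]
      exact Nat.digits_ofDigits 10 (by norm_num) l hmem (fun _ => hlast)
    rw [this, hl, List.reverse_reverse]
  · intro h
    have hrev : (Nat.digits 10 a).reverse = Nat.digits 10 b := by
      rw [h, List.reverse_reverse]
    have hval : (Nat.ofDigits 10 (Nat.digits 10 a).reverse : ℕ) = b := by
      rw [hrev, Nat.ofDigits_digits]
    have hlen : (Nat.digits 10 b).length = k := by
      rw [← hrev, List.length_reverse, hk]
    have hhi : b < 10 ^ k := by
      rw [← hlen]
      exact Nat.lt_base_pow_length_digits (by norm_num)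
    have hlo : 10 ^ (k - 1) ≤ b := by
      have h1 := Nat.base_pow_length_digits_le 10 b (by norm_num) hb.ne'
      rw [hlen] at h1
      have hk1 : 1 ≤ k := by
        rw [← hlen]
        have : Nat.digits 10 b ≠ [] := Nat.digits_ne_nil_iff_ne_zero.mpr hb.ne'
        cases hc : Nat.digits 10 b with
        | nil => exact absurd hc this
        | cons x xs => simp
      have h2 : 10 ^ (k - 1) * 10 ≤ 10 * b := by
        calc 10 ^ (k - 1) * 10 = 10 ^ k := by rw [← pow_succ]; congr 1; omega
          _ ≤ 10 * b := h1
      omega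
    exact ⟨hlo, hhi, hval⟩

theorem pvMain (num1 num2 : Int) (hD : ¬ D_mirrored_couple num1 num2) :
    mirrored_couple num1 num2 = mirrored_couple_alt num1 num2 := by
  rw [pvAlt_eq, mirrored_couple]
  rcases lt_trichotomy num1 0 with h1 | h1 | h1
  · -- num1 < 0 : A exits with num2 ≠ 0 (since ¬D_), B compares a '-'-terminated reversal
    have h2 : num2 ≠ 0 := fun h => hD ⟨h1, h⟩
    rw [mirrored_couple_loop, if_neg (by omega), if_pos h2]
    rw [eq_comm, decide_eq_false_iff_not]
    intro hEq
    rw [pvToChars_eq, pvToChars_eq, if_pos h1] at hEq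
    rcases lt_or_gt_of_ne h2 with h2' | h2'
    · rw [if_pos h2'] at hEq
      have hL : (('-' :: pvNumeral num1.natAbs).reverse).getLast? = some '-' := by
        rw [List.reverse_cons, List.getLast?_concat]
      have hne := pvNumeral_ne_nil num2.natAbs
      have hR : ('-' :: pvNumeral num2.natAbs).getLast? = (pvNumeral num2.natAbs).getLast? := by
        cases hp : pvNumeral num2.natAbs with
        | nil => exact absurd hp hne
        | cons x xs => simp [List.getLast?_cons_cons]
      rw [hEq, hR] at hL
      exact pvDash_not_mem _ (List.mem_of_getLast? hL)
    · rw [if_neg (by omega)] at hEq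
      have hm : '-' ∈ ('-' :: pvNumeral num1.natAbs).reverse := by simp
      rw [hEq] at hm
      exact pvDash_not_mem _ hm
  · -- num1 = 0 : A answers (num2 == 0), B compares "0" with str(num2)
    subst h1
    rw [mirrored_couple_loop, if_neg (by omega : ¬ (0:ℤ) < 0)]
    rw [pvToChars_eq, if_neg (by omega : ¬ (0:ℤ) < 0), pvToChars_eq]
    by_cases h2 : num2 = 0
    · subst h2
      simp [pvNumeral]
    · rw [if_pos h2, eq_comm, decide_eq_false_iff_not]
      intro hEq
      rcases lt_or_gt_of_ne h2 with h2' | h2'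
      · rw [if_pos h2'] at hEq
        simp [pvNumeral] at hEq
      · rw [if_neg (by omega : ¬ num2 < 0)] at hEq
        have : pvNumeral num2.toNat = ['0'] := by
          rw [← hEq]
          simp [pvNumeral]
        rw [pvNumeral_singleton] at this
        omega
  · -- num1 > 0
    have e1 : num1 = ((num1.toNat : ℕ) : Int) := by omega
    have ha : 0 < num1.toNat := by omega
    rcases lt_or_ge num2 0 with h2 | h2
    · -- num2 < 0 : A's loop never sees num2 hit 0; B's RHS carries '-'
      rw [pvLoop_neg num1.toNat _ _ _ _ (by omega) h2]
      rw [eq_comm, decide_eq_false_iff_not]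
      intro hEq
      rw [pvToChars_eq, pvToChars_eq, if_neg (by omega), if_pos h2] at hEq
      have hm : '-' ∈ ('-' :: pvNumeral num2.natAbs) := by simp
      rw [← hEq, List.mem_reverse] at hm
      exact pvDash_not_mem _ hm
    · -- num2 ≥ 0 : the arithmetic characterisation meets the string characterisation
      have e2 : num2 = ((num2.toNat : ℕ) : Int) := by omega
      rw [e1, e2, pvLoop_char num1.toNat num1.toNat num2.toNat 0 (num2.toNat : Int) rfl ha]
      rw [pvToChars_eq, pvToChars_eq, if_neg (by omega), if_neg (by omega)]
      simp only [Int.toNat_natCast]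
      rw [decide_eq_decide]
      have hA0 : pvNumeral num1.toNat = ((Nat.digits 10 num1.toNat).map Nat.digitChar).reverse := by
        rw [pvNumeral, if_neg ha.ne']
      by_cases hb : num2.toNat = 0
      · rw [hb]
        have hpow : 0 < 10 ^ ((Nat.digits 10 num1.toNat).length - 1) :=
          pow_pos (by norm_num : (0:ℕ) < 10) _
        constructor
        · rintro ⟨hle, -, -⟩; omega
        · intro hEq
          exfalso
          have : pvNumeral num1.toNat = ['0'] := by
            have := congrArg List.reverse hEq
            rw [List.reverse_reverse] at this
            rw [this, pvNumeral]
            simp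
          rw [pvNumeral_singleton] at this
          omega
      · have hbpos : 0 < num2.toNat := Nat.pos_of_ne_zero hb
        have hB : (pvNumeral num1.toNat).reverse = pvNumeral num2.toNat
            ↔ Nat.digits 10 num1.toNat = (Nat.digits 10 num2.toNat).reverse := by
          rw [hA0, List.reverse_reverse, pvNumeral, if_neg hb, ← List.map_reverse]
          exact pvMapEq _ _ (fun x hx => Nat.digits_lt_base (by norm_num) hx)
            (fun x hx => Nat.digits_lt_base (by norm_num) (List.mem_reverse.mp hx))
        rw [hB, ← pvKey num1.toNat num2.toNat ha hbpos]
        constructor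
        · rintro ⟨c1, c2, c3⟩
          refine ⟨c1, c2, ?_⟩
          omega
        · rintro ⟨c1, c2, c3⟩
          refine ⟨c1, c2, ?_⟩
          omega

-- ===== VERDICT (by name: the statement is the Claim_ definition above) =====
theorem mirrored_couple_spec : Claim_unchanged_mirrored_couple := by
  intro num1 num2 _ hD
  exact pvMain num1 num2 hD

theorem mirrored_couple_changed : Claim_changed_mirrored_couple := by
  unfold Claim_changed_mirrored_couple
  refine ⟨by decide, by decide, ?_, by decide, by decide⟩
  show mirrored_couple (-1) 0 = true
  rw [mirrored_couple, mirrored_couple_loop]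
  norm_num

theorem mirrored_couple_tight : Claim_exact_mirrored_couple := by
  intro num1 num2 _ hd
  obtain ⟨h1, h2⟩ := hd
  subst h2
  have hA : mirrored_couple num1 0 = true := by
    rw [mirrored_couple, mirrored_couple_loop, if_neg (by omega)]
    norm_num
  have hB : mirrored_couple_alt num1 0 = false := by
    rw [pvAlt_eq, decide_eq_false_iff_not]
    intro hEq
    rw [pvToChars_eq, pvToChars_eq, if_pos h1, if_neg (by omega)] at hEq
    have hm : '-' ∈ ('-' :: pvNumeral num1.natAbs).reverse := by simp
    rw [hEq] at hm
    exact pvDash_not_mem _ hm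
  rw [hA, hB]
  simp
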